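-- pv_equiv track=rewrite | github.com/Wang-Jianwei/xswl-YPack | ypack/converters/convert_nsis.py | _reorder_mui_language
-- ===== SOURCE A (Python) =====
-- from typing import Any, Dict, List, Optional
--
-- def _reorder_mui_language(lines: List[str]) -> List[str]:
--     """Reorder script lines so MUI_LANGUAGE and LangString come after UI pages.
--
--     NSIS MUI requires:
--     1. ``!insertmacro MUI_LANGUAGE`` comes AFTER all ``MUI_PAGE_*`` macros.
--     2. ``LangString`` definitions come AFTER ``MUI_LANGUAGE`` (so that the
--        ``LANG_*`` constants are already defined).
--
--     The reordered section after the last page directive becomes::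
--
--         ; ... pages ...
--         !insertmacro MUI_LANGUAGE "English"
--         !insertmacro MUI_LANGUAGE "SimpChinese"
--         LangString SHORTCUTS_PAGE_TITLE ${LANG_ENGLISH} "..."
--         LangString SHORTCUTS_PAGE_TITLE ${LANG_SIMPCHINESE} "..."
--         ; ... rest of script ...
--     """
--     language_directives = []  # MUI_LANGUAGE macros
--     langstring_defs = []       # LangString definitions
--     other_lines = []
--     found_last_page = -1
--
--     for i, line in enumerate(lines):
--         stripped = line.strip()
--
--         # Track the last MUI_PAGE or MUI_UNPAGE macro or custom page
--         if stripped.startswith('!insertmacro MUI_PAGE') or \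
--            stripped.startswith('!insertmacro MUI_UNPAGE') or \
--            stripped.startswith('Page custom'):
--             found_last_page = len(other_lines)
--
--         # Collect language directives to move
--         if stripped.startswith('!insertmacro MUI_LANGUAGE'):
--             language_directives.append(line)
--         elif stripped.startswith('LangString '):
--             langstring_defs.append(line)
--         else:
--             other_lines.append(line)
--
--     # If we have language directives, reorder them
--     if found_last_page >= 0 and language_directives:
--         # Insert pattern: ...pages... + MUI_LANGUAGE + LangStrings + ...rest...
--         # MUI_LANGUAGE must come before LangString so LANG_* constants exist.
--         result = other_lines[:found_last_page + 1] + \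
--                  language_directives + \
--                  langstring_defs + \
--                  other_lines[found_last_page + 1:]
--         return result
--
--     # Otherwise return as-is (either no pages or no language directives)
--     return lines
-- ===== SOURCE B (Python) =====
-- def _reorder_mui_language(lines):
--     """Single backward pass: scan from the end, collecting language/LangString
--     lines; the first page directive seen from the back marks the split between
--     the 'before' part (it and everything above) and the 'after' part."""
--     lang, ls, after, before = [], [], [], []
--     seen_page = False
--     for line in reversed(lines):
--         s = line.strip()
--         if s.startswith('!insertmacro MUI_LANGUAGE'):
--             lang.append(line)
--         elif s.startswith('LangString '):
--             ls.append(line)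
--         elif seen_page:
--             before.append(line)
--         elif (s.startswith('!insertmacro MUI_PAGE')
--               or s.startswith('!insertmacro MUI_UNPAGE')
--               or s.startswith('Page custom')):
--             seen_page = True
--             before.append(line)
--         else:
--             after.append(line)
--     if seen_page and lang:
--         return (list(reversed(before)) + list(reversed(lang))
--                 + list(reversed(ls)) + list(reversed(after)))
--     return lines
-- ===== Notes on version B (the rewrite author's own statement) =====
-- stated objective: alternative
-- what changed: Replaces A's forward pass that partitions into three lists while tracking a numeric last-page index and then splices with two slices, by a single backward scan with a boolean phase flag: the first page directive seen from the back splits the non-moved lines into 'before' and 'after' pieces directly, so no index is ever computed and no slicing is done.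
import Mathlib
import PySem

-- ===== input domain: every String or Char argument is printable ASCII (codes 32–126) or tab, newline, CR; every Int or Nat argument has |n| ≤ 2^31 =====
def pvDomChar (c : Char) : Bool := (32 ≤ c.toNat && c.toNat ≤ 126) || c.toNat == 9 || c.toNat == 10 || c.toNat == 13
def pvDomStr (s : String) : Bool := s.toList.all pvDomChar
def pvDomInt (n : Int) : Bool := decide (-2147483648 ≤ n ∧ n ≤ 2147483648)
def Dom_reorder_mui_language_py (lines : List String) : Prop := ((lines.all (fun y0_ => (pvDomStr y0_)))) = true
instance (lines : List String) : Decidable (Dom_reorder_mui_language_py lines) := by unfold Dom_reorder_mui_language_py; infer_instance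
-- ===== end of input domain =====

-- B replaces A's forward partition-with-index-tracking plus two slices by a single
-- backward scan with a boolean phase flag that splits the non-moved lines directly
-- (objective: alternative; same asymptotic cost).

-- ===== PORT A =====
-- loop body of A's single for-loop (state: language_directives, langstring_defs, other_lines, found_last_page)
def pvStepA (st : List String × List String × List String × Int) (line : String) :
    List String × List String × List String × Int :=
  match st with
  | (lang, ls, other, fl) =>
    let stripped := PySem.Str.strip line
    let fl := if PySem.Str.startswith stripped "!insertmacro MUI_PAGE"
               || PySem.Str.startswith stripped "!insertmacro MUI_UNPAGE"
               || PySem.Str.startswith stripped "Page custom"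
              then (other.length : Int) else fl
    if PySem.Str.startswith stripped "!insertmacro MUI_LANGUAGE" then (lang ++ [line], ls, other, fl)
    else if PySem.Str.startswith stripped "LangString " then (lang, ls ++ [line], other, fl)
    else (lang, ls, other ++ [line], fl)

def reorder_mui_language_py (lines : List String) : List String :=
  match lines.foldl pvStepA ([], [], [], -1) with
  | (lang, ls, other, fl) =>
    if 0 ≤ fl ∧ lang ≠ [] then
      PySem.List.slice other none (some (fl + 1)) ++ lang ++ ls ++
        PySem.List.slice other (some (fl + 1)) none
    else lines

-- ===== PORT B =====
-- loop body of B's backward for-loop over reversed(lines)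
-- (state: lang, ls, after, before, seen_page)
def pvStepB (st : List String × List String × List String × List String × Bool) (line : String) :
    List String × List String × List String × List String × Bool :=
  match st with
  | (lang, ls, after, before, seen) =>
    let s := PySem.Str.strip line
    if PySem.Str.startswith s "!insertmacro MUI_LANGUAGE" then (lang ++ [line], ls, after, before, seen)
    else if PySem.Str.startswith s "LangString " then (lang, ls ++ [line], after, before, seen)
    else if seen then (lang, ls, after, before ++ [line], seen)
    else if PySem.Str.startswith s "!insertmacro MUI_PAGE"
          || PySem.Str.startswith s "!insertmacro MUI_UNPAGE"
          || PySem.Str.startswith s "Page custom"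
         then (lang, ls, after, before ++ [line], true)
    else (lang, ls, after ++ [line], before, seen)

def reorder_mui_language_py_alt (lines : List String) : List String :=
  match lines.reverse.foldl pvStepB ([], [], [], [], false) with
  | (lang, ls, after, before, seen) =>
    if seen = true ∧ lang ≠ [] then
      before.reverse ++ lang.reverse ++ ls.reverse ++ after.reverse
    else lines

-- ===== PRECONDITION & SPEC =====
def Spec_reorder_mui_language_py (lines : List String) (out : List String) : Prop := out = reorder_mui_language_py_alt lines
instance (lines : List String) (out : List String) : Decidable (Spec_reorder_mui_language_py lines out) := by unfold Spec_reorder_mui_language_py; infer_instance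

-- ===== CLAIM (what is proved, stated in full; the proofs are below) =====
def Claim_equal_reorder_mui_language_py : Prop := ∀ (lines : List String), Dom_reorder_mui_language_py lines → Spec_reorder_mui_language_py lines (reorder_mui_language_py lines)

-- ===== LEMMAS AND PROOFS =====

def pvIsLang (line : String) : Bool :=
  PySem.Str.startswith (PySem.Str.strip line) "!insertmacro MUI_LANGUAGE"

def pvIsLangString (line : String) : Bool :=
  PySem.Str.startswith (PySem.Str.strip line) "LangString "

def pvIsPage (line : String) : Bool :=
  let s := PySem.Str.strip line
  PySem.Str.startswith s "!insertmacro MUI_PAGE"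
    || PySem.Str.startswith s "!insertmacro MUI_UNPAGE"
    || PySem.Str.startswith s "Page custom"

-- last index < n of a page line in `other`, else -1 (specification device for both ports)
def pvLastPageAux (other : List String) : Nat → Int
  | 0 => -1
  | n + 1 => if pvIsPage (other.getD n "") then (n : Int) else pvLastPageAux other n

-- a string cannot start with two of the literal prefixes at once
theorem pv_not_both {s p q : List Char} (hp : PySem.Chars.startswith s p = true)
    (hq : PySem.Chars.startswith s q = true) (h1 : ¬ p <+: q) (h2 : ¬ q <+: p) : False := by
  rw [PySem.Chars.startswith_iff] at hp hq
  rcases List.prefix_or_prefix_of_prefix hp hq with h | h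
  · exact h1 h
  · exact h2 h

theorem pv_page_cat (x : String) (h : pvIsPage x = true) :
    pvIsLang x = false ∧ pvIsLangString x = false := by
  simp only [pvIsPage, Bool.or_eq_true] at h
  constructor
  · by_contra hc
    simp only [pvIsLang, Bool.not_eq_false] at hc
    simp only [PySem.Str.startswith_eq] at hc h
    rcases h with (h | h) | h <;>
      exact absurd (pv_not_both h hc (by decide) (by decide)) (by simp)
  · by_contra hc
    simp only [pvIsLangString, Bool.not_eq_false] at hc
    simp only [PySem.Str.startswith_eq] at hc h
    rcases h with (h | h) | h <;>
      exact absurd (pv_not_both h hc (by decide) (by decide)) (by simp)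

theorem pv_lang_not_langstring (x : String) (h : pvIsLang x = true) :
    pvIsLangString x = false := by
  by_contra hc
  simp only [pvIsLangString, Bool.not_eq_false] at hc
  simp only [pvIsLang] at h
  simp only [PySem.Str.startswith_eq] at h hc
  exact absurd (pv_not_both h hc (by decide) (by decide)) (by simp)

-- A's loop body, re-expressed through the predicates (definitional)
theorem pvStepA_eq (st : List String × List String × List String × Int) (x : String) :
    pvStepA st x =
      (match st with
       | (lang, ls, other, fl) =>
         let fl' := if pvIsPage x then (other.length : Int) else fl
         if pvIsLang x then (lang ++ [x], ls, other, fl')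
         else if pvIsLangString x then (lang, ls ++ [x], other, fl')
         else (lang, ls, other ++ [x], fl')) := rfl

-- B's loop body, re-expressed through the predicates (definitional)
theorem pvStepB_eq (st : List String × List String × List String × List String × Bool) (x : String) :
    pvStepB st x =
      (match st with
       | (lang, ls, after, before, seen) =>
         if pvIsLang x then (lang ++ [x], ls, after, before, seen)
         else if pvIsLangString x then (lang, ls ++ [x], after, before, seen)
         else if seen then (lang, ls, after, before ++ [x], seen)
         else if pvIsPage x then (lang, ls, after, before ++ [x], true)
         else (lang, ls, after ++ [x], before, seen)) := rfl

theorem pvLastPageAux_append (o : List String) (x : String) (n : Nat) (h : n ≤ o.length) :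
    pvLastPageAux (o ++ [x]) n = pvLastPageAux o n := by
  induction n with
  | zero => rfl
  | succ k ih =>
    have hk : k < o.length := h
    have hg : (o ++ [x]).getD k "" = o.getD k "" := by
      simp [List.getD, List.getElem?_append_left hk]
    simp only [pvLastPageAux, hg, ih (Nat.le_of_lt hk)]

theorem pvLastPageAux_last_page (o : List String) (x : String) (hp : pvIsPage x = true) :
    pvLastPageAux (o ++ [x]) (o.length + 1) = (o.length : Int) := by
  have hg : (o ++ [x]).getD o.length "" = x := by simp [List.getD]
  simp only [pvLastPageAux, hg, hp, if_pos]

theorem pvLastPageAux_last_not_page (o : List String) (x : String) (hp : pvIsPage x = false) :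
    pvLastPageAux (o ++ [x]) (o.length + 1) = pvLastPageAux o o.length := by
  have hg : (o ++ [x]).getD o.length "" = x := by simp [List.getD]
  simp only [pvLastPageAux, hg, hp]
  exact pvLastPageAux_append o x o.length (le_refl _)

theorem pv_fold_eq (lines : List String) :
    lines.foldl pvStepA ([], [], [], -1) =
      (lines.filter (fun l => pvIsLang l),
       lines.filter (fun l => pvIsLangString l),
       lines.filter (fun l => !pvIsLang l && !pvIsLangString l),
       pvLastPageAux (lines.filter (fun l => !pvIsLang l && !pvIsLangString l))
         (lines.filter (fun l => !pvIsLang l && !pvIsLangString l)).length) := by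
  induction lines using List.reverseRecOn with
  | nil => rfl
  | append_singleton l x ih =>
    rw [List.foldl_append, ih]
    simp only [List.foldl_cons, List.foldl_nil, List.filter_append, List.filter_singleton,
      pvStepA_eq]
    cases hL : pvIsLang x with
    | true =>
      have hP : pvIsPage x = false := by
        cases hPg : pvIsPage x
        · rfl
        · exact absurd (pv_page_cat x hPg).1 (by simp [hL])
      simp [hP, pv_lang_not_langstring x hL]
    | false =>
      cases hS : pvIsLangString x with
      | true =>
        have hP : pvIsPage x = false := by
          cases hPg : pvIsPage x
          · rfl
          · exact absurd (pv_page_cat x hPg).2 (by simp [hS])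
        simp [hP]
      | false =>
        cases hP : pvIsPage x with
        | true => simp [pvLastPageAux_last_page _ _ hP]
        | false => simp [pvLastPageAux_last_not_page _ _ hP]

-- prepending a line shifts the last-page index
theorem pvLastPageAux_cons (x : String) (o : List String) (n : Nat) :
    pvLastPageAux (x :: o) (n + 1) =
      if 0 ≤ pvLastPageAux o n then pvLastPageAux o n + 1
      else if pvIsPage x then 0 else -1 := by
  induction n with
  | zero => simp [pvLastPageAux, List.getD]
  | succ k ih =>
    have hg : (x :: o).getD (k + 1) "" = o.getD k "" := rfl
    rw [show pvLastPageAux (x :: o) (k + 1 + 1)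
          = if pvIsPage ((x :: o).getD (k + 1) "") then ((k + 1 : Nat) : Int)
            else pvLastPageAux (x :: o) (k + 1) from rfl, hg,
        show pvLastPageAux o (k + 1)
          = if pvIsPage (o.getD k "") then ((k : Nat) : Int) else pvLastPageAux o k from rfl]
    cases hp : pvIsPage (o.getD k "") with
    | true =>
      simp only [hp, if_pos, Nat.cast_add, Nat.cast_one]
      split <;> omega
    | false => simpa using ih

theorem pvLastPageAux_lt (o : List String) (n : Nat) : pvLastPageAux o n < n := by
  induction n with
  | zero => simp [pvLastPageAux]
  | succ k ih =>
    simp only [pvLastPageAux]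
    split
    · omega
    · omega

-- invariant of B's backward fold, expressed with the same specification pieces as A's
theorem pvB_fold_eq (lines : List String) :
    lines.reverse.foldl pvStepB ([], [], [], [], false) =
      (let other := lines.filter (fun l => !pvIsLang l && !pvIsLangString l)
       let fl := pvLastPageAux other other.length
       ((lines.filter (fun l => pvIsLang l)).reverse,
        (lines.filter (fun l => pvIsLangString l)).reverse,
        if 0 ≤ fl then (other.drop (fl.toNat + 1)).reverse else other.reverse,
        if 0 ≤ fl then (other.take (fl.toNat + 1)).reverse else [],
        decide (0 ≤ fl))) := by
  induction lines with
  | nil => rfl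
  | cons x l ih =>
    rw [List.reverse_cons, List.foldl_append, ih]
    simp only [List.foldl_cons, List.foldl_nil, List.filter_cons, pvStepB_eq]
    cases hL : pvIsLang x with
    | true => simp [pv_lang_not_langstring x hL]
    | false =>
      cases hS : pvIsLangString x with
      | true => simp
      | false =>
        simp only [hL, hS, Bool.not_true, Bool.not_false, Bool.and_self, if_true,
          Bool.false_eq_true, if_false, if_neg (by simp : ¬ (false = true))]
        set o := l.filter (fun l => !pvIsLang l && !pvIsLangString l) with ho
        have hcons : pvLastPageAux (x :: o) (o.length + 1) =
            if 0 ≤ pvLastPageAux o o.length then pvLastPageAux o o.length + 1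
            else if pvIsPage x then 0 else -1 := pvLastPageAux_cons x o o.length
        by_cases h0 : 0 ≤ pvLastPageAux o o.length
        · have hlt : pvLastPageAux o o.length < o.length := pvLastPageAux_lt o o.length
          have hfl' : pvLastPageAux (x :: o) (o.length + 1) = pvLastPageAux o o.length + 1 := by
            rw [hcons, if_pos h0]
          simp only [decide_eq_true h0, if_pos h0, List.length_cons, hfl',
            if_pos (by omega : (0:Int) ≤ pvLastPageAux o o.length + 1), decide_eq_true
              (by omega : (0:Int) ≤ pvLastPageAux o o.length + 1)]
          have ht : (pvLastPageAux o o.length + 1).toNat = (pvLastPageAux o o.length).toNat + 1 := by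
            omega
          simp [ht, List.take_succ_cons, List.drop_succ_cons]
        · have hfl' : pvLastPageAux (x :: o) (o.length + 1) =
              if pvIsPage x then 0 else -1 := by rw [hcons, if_neg h0]
          simp only [decide_eq_false h0, if_neg h0, List.length_cons, hfl', if_false]
          cases hP : pvIsPage x with
          | true =>
            simp [hP]
          | false =>
            simp [hP]

-- slice lemmas for A's branch
theorem pv_slice_take (o : List String) (fl : Int) (h : 0 ≤ fl) :
    PySem.List.slice o none (some (fl + 1)) = o.take (fl.toNat + 1) := by
  rw [PySem.List.slice_to o (by omega : (0:Int) ≤ fl + 1)]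
  congr 1
  omega

theorem pv_slice_drop (o : List String) (fl : Int) (h : 0 ≤ fl) :
    PySem.List.slice o (some (fl + 1)) none = o.drop (fl.toNat + 1) := by
  rw [PySem.List.slice_from o (by omega : (0:Int) ≤ fl + 1)]
  congr 1
  omega

-- ===== VERDICT (by name: the statement is the Claim_ definition above) =====
theorem reorder_mui_language_py_spec : Claim_equal_reorder_mui_language_py := by
  intro lines _
  show reorder_mui_language_py lines = reorder_mui_language_py_alt lines
  unfold reorder_mui_language_py reorder_mui_language_py_alt
  rw [pv_fold_eq, pvB_fold_eq]
  simp only []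
  set langF := lines.filter (fun l => pvIsLang l) with hlang
  set o := lines.filter (fun l => !pvIsLang l && !pvIsLangString l) with ho
  set fl := pvLastPageAux o o.length with hfl
  by_cases h0 : 0 ≤ fl
  · by_cases hL : langF = []
    · simp [h0, hL]
    · have hLr : langF.reverse ≠ [] := by simpa using hL
      simp only [if_pos (And.intro h0 hL), decide_eq_true h0, if_pos h0,
        List.reverse_reverse]
      rw [pv_slice_take o fl h0, pv_slice_drop o fl h0]
      simp [hLr]
  · have : ¬ (0 ≤ fl ∧ langF ≠ []) := fun h => h0 h.1
    simp [this, h0]
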